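-- pv_equiv track=rewrite | github.com/wifiguru10/autoMAC | switchDB.py | isCiscoMAC
-- ===== SOURCE A (Python) =====
-- import string
--
-- def isCiscoMAC(mac):
--     if not len(mac) == 14:
--         return False
--     if mac[4] == '.' and mac[9] == '.':
--         # pretty good chance at this point
--         mac_split = mac.split('.')
--         if not len(mac_split) == 3:
--             return False
--         mac_first = all(c in string.hexdigits for c in mac_split[0])
--         mac_second = all(c in string.hexdigits for c in mac_split[1])
--         mac_third = all(c in string.hexdigits for c in mac_split[2])
--         return mac_first and mac_second and mac_third  # only true if all three fields
--     return False
-- ===== SOURCE B (Python) =====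
-- import string
--
-- _HEX = frozenset(string.hexdigits)
--
-- def isCiscoMAC(mac):
--     if len(mac) != 14:
--         return False
--     return all(c == '.' if i in (4, 9) else c in _HEX for i, c in enumerate(mac))
-- ===== Notes on version B (the rewrite author's own statement) =====
-- stated objective: simpler
-- what changed: Replaces the dot-split-into-three-fields check and three per-field all() hex scans with one positional pass over the characters: indices 4 and 9 must be dots, every other index a hex digit.
import Mathlib
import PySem

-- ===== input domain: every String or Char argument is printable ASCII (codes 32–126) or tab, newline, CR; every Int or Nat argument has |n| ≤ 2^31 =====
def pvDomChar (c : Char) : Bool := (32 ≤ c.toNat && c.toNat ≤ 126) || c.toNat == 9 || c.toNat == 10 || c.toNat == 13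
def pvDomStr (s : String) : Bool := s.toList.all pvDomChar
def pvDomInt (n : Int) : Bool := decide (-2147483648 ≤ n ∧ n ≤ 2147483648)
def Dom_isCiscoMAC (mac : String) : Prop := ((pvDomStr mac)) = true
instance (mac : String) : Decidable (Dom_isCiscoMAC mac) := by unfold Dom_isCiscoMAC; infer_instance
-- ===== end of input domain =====

-- B replaces A's split('.') + three per-field hex scans by one positional pass over the characters (simpler); same return value.

-- string.hexdigits, shared by both ports ('c in string.hexdigits' in A / 'c in _HEX' in B is the same membership test)
def pvHex (c : Char) : Bool := ("0123456789abcdefABCDEF".toList).contains c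

-- ===== PORT A =====
def isCiscoMAC (mac : String) : Bool :=
  if !(PySem.Str.len mac == 14) then false
  else if (PySem.Str.pyGet? mac 4 == some '.') && (PySem.Str.pyGet? mac 9 == some '.') then
    -- the split: split? returns some because the one-character dot separator is nonempty, so .getD [] is exact
    let mac_split := (PySem.Str.split? mac ".").getD []
    if !(PySem.List.len mac_split == 3) then false
    else
      -- indices 0,1,2 are in range under the len == 3 guard, so pyGetD is exact
      let mac_first := ((PySem.List.pyGetD mac_split 0 "").toList).all pvHex
      let mac_second := ((PySem.List.pyGetD mac_split 1 "").toList).all pvHex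
      let mac_third := ((PySem.List.pyGetD mac_split 2 "").toList).all pvHex
      mac_first && mac_second && mac_third
  else false

-- ===== PORT B =====
def isCiscoMAC_alt (mac : String) : Bool :=
  if !(PySem.Str.len mac == 14) then false
  else (PySem.List.enumerate mac.toList 0).all
    (fun ic => if ic.1 == 4 || ic.1 == 9 then ic.2 == '.' else pvHex ic.2)

-- ===== PRECONDITION & SPEC =====
def Spec_isCiscoMAC (mac : String) (out : Bool) : Prop := out = isCiscoMAC_alt mac
instance (mac : String) (out : Bool) : Decidable (Spec_isCiscoMAC mac out) := by unfold Spec_isCiscoMAC; infer_instance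

-- ===== CLAIM (what is proved, stated in full; the proofs are below) =====
def Claim_equal_isCiscoMAC : Prop := ∀ (mac : String), Dom_isCiscoMAC mac → Spec_isCiscoMAC mac (isCiscoMAC mac)

-- ===== LEMMAS AND PROOFS =====

-- PySem's fuelled single-char split is Mathlib's List.splitOn
theorem pv_go_eq (fuel : Nat) : ∀ (l cur : List Char) (acc : List (List Char)), l.length < fuel →
    PySem.Chars.splitOn.go ['.'] fuel l cur acc
      = acc.reverse ++ (List.splitOn '.' l).modifyHead (cur.reverse ++ ·) := by
  induction fuel with
  | zero => intro l cur acc h; omega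
  | succ f ih =>
    intro l cur acc h
    cases l with
    | nil =>
      rw [PySem.Chars.splitOn.go.eq_def]
      simp [List.splitOn]
    | cons c rest =>
      rw [PySem.Chars.splitOn.go.eq_def]
      by_cases hc : c = '.'
      · subst hc
        simp only [List.isPrefixOf, BEq.rfl, Bool.true_and, if_pos, List.length_cons,
          List.drop_succ_cons, List.length_nil, List.drop_zero]
        rw [ih rest [] ((List.reverse cur) :: acc) (by simpa using h)]
        simp [List.splitOn, List.splitOnP_cons]
        cases List.splitOnP (fun x => x == '.') rest <;> simp
      · have hp : (['.'].isPrefixOf (c :: rest)) = false := by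
          simp [List.isPrefixOf]
          exact Ne.symm hc
        simp only [hp, Bool.false_eq_true]
        rw [ih rest (c :: cur) acc (by simpa using h)]
        have hc' : ((c == '.') = true) = False := by simp [hc]
        simp [List.splitOn, List.splitOnP_cons, hc']
        cases hsp : List.splitOnP (fun x => x == '.') rest <;> simp

theorem pv_splitOn_eq (l : List Char) :
    PySem.Chars.splitOn l ['.'] = List.splitOn '.' l := by
  unfold PySem.Chars.splitOn
  rw [pv_go_eq (l.length + 1) l [] [] (by omega)]
  cases List.splitOn '.' l <;> simp

theorem pv_splitOn_length (l : List Char) :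
    (List.splitOn '.' l).length = l.count '.' + 1 := by
  induction l with
  | nil => simp
  | cons c t ih =>
    by_cases hc : c = '.'
    · subst hc; simp [List.splitOn, List.splitOnP_cons] at *; omega
    · have hc' : ((c == '.') = true) = False := by simp [hc]
      simp [List.splitOn, List.splitOnP_cons, List.count_cons, hc'] at *
      omega

theorem pv_splitOn_all_hex (l : List Char) :
    (List.splitOn '.' l).all (fun p => p.all pvHex)
      = l.all (fun c => c == '.' || pvHex c) := by
  induction l with
  | nil => simp
  | cons c t ih =>
    by_cases hc : c = '.'
    · subst hc
      simp [List.splitOn, List.splitOnP_cons] at *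
      exact ih
    · have hc' : ((c == '.') = true) = False := by simp [hc]
      have hb : (c == '.') = false := by simp [hc]
      simp only [List.splitOn, List.splitOnP_cons, hc', if_false, List.all_cons]
      rw [← ih]
      simp only [List.splitOn]
      cases hsp : List.splitOnP (fun b => b == '.') t with
      | nil => exact absurd hsp (List.splitOnP_ne_nil _ _)
      | cons p ps => simp [hb, Bool.and_assoc]

-- '.' is not a hex digit: dropping the no-dot condition turns the guarded scan into a plain hex scan
theorem pv_key (l : List Char) :
    (decide (l.count '.' = 0) && l.all (fun c => c == '.' || pvHex c)) = l.all pvHex := by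
  induction l with
  | nil => simp
  | cons c t ih =>
    by_cases hc : c = '.'
    · subst hc
      simp [pvHex]
    · cases hpc : pvHex c <;>
        simp [hc, hpc, ← ih]

-- A in closed form: length 14, dots at 4 and 9, exactly two dots, every char a dot or hex digit
theorem isCiscoMAC_char (mac : String) : isCiscoMAC mac =
    ((decide (mac.toList.length = 14)) &&
     (PySem.List.pyGet? mac.toList 4 == some '.') &&
     (PySem.List.pyGet? mac.toList 9 == some '.') &&
     (decide (mac.toList.count '.' = 2)) &&
     mac.toList.all (fun c => c == '.' || pvHex c)) := by
  unfold isCiscoMAC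
  simp only [PySem.Str.len, PySem.Str.pyGet?, PySem.Chars.pyGet?]
  by_cases h14 : mac.toList.length = 14
  case neg =>
    have h14' : ¬ mac.length = 14 := by
      intro h; exact h14 (by simpa using h)
    have hL : (((mac.toList.length : Int)) == 14) = false := by
      simp; exact_mod_cast h14
    have hR : decide (mac.toList.length = 14) = false := by simp; exact h14'
    simp only [hL, Bool.not_false, if_true, hR, Bool.false_and]
  case pos =>
  have hL : (((mac.toList.length : Int)) == 14) = true := by simp [h14]
  have hb4 : (4 : Nat) < mac.toList.length := by omega
  have hb9 : (9 : Nat) < mac.toList.length := by omega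
  have he4 : PySem.List.pyGet? mac.toList 4 = some (mac.toList[4]'hb4) := by
    rw [PySem.List.pyGet?_of_nonneg _ (by norm_num)]
    exact List.getElem?_eq_getElem hb4
  have he9 : PySem.List.pyGet? mac.toList 9 = some (mac.toList[9]'hb9) := by
    rw [PySem.List.pyGet?_of_nonneg _ (by norm_num)]
    exact List.getElem?_eq_getElem hb9
  rw [he4, he9, hL]
  simp only [Bool.not_true, Bool.false_eq_true, if_false, h14, decide_true, Bool.true_and]
  by_cases hc4 : mac.toList[4]'hb4 = '.'
  case neg => simp [hc4]
  case pos =>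
  by_cases hc9 : mac.toList[9]'hb9 = '.'
  case neg => simp [hc4, hc9]
  case pos =>
  simp only [hc4, hc9, BEq.rfl, Bool.and_self, if_true, Bool.true_and]
  have hsq : PySem.Str.split? mac "." = some ((List.splitOn '.' mac.toList).map String.ofList) := by
    have hdot : (".".toList) = ['.'] := by decide
    simp [PySem.Str.split?, PySem.Chars.split?, hdot, pv_splitOn_eq]
  rw [hsq, Option.getD_some]
  by_cases hc2 : mac.toList.count '.' = 2
  case neg =>
    have hg3 : ¬ ((((List.splitOn '.' mac.toList).length : Int)) = 3) := by
      rw [pv_splitOn_length]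
      push_cast
      omega
    simp [PySem.List.len, hg3, hc2]
  case pos =>
    have hlen3 : (List.splitOn '.' mac.toList).length = 3 := by
      rw [pv_splitOn_length, hc2]
    rcases hps : List.splitOn '.' mac.toList with _ | ⟨p, _ | ⟨q, _ | ⟨r, _ | _⟩⟩⟩ <;>
      simp [hps] at hlen3
    rw [← pv_splitOn_all_hex, hps]
    simp [PySem.List.len, PySem.List.pyGetD, PySem.List.pyGet?, PySem.List.pyIdx?, hc2,
      Bool.and_assoc]

-- B in closed form (its length guard made explicit)
theorem isCiscoMAC_alt_char (mac : String) : isCiscoMAC_alt mac =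
    ((decide (mac.toList.length = 14)) &&
     (PySem.List.enumerate mac.toList 0).all
       (fun ic => if ic.1 == 4 || ic.1 == 9 then ic.2 == '.' else pvHex ic.2)) := by
  unfold isCiscoMAC_alt
  have hcast : ((mac.length : Int) = 14) ↔ mac.length = 14 := by
    exact_mod_cast Iff.rfl
  by_cases h : mac.toList.length = 14 <;>
    simp [PySem.Str.len, hcast, h]

-- the two closed forms agree
theorem pv_main (cs : List Char) :
    ((decide (cs.length = 14)) &&
     (PySem.List.pyGet? cs 4 == some '.') &&
     (PySem.List.pyGet? cs 9 == some '.') &&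
     (decide (cs.count '.' = 2)) &&
     cs.all (fun c => c == '.' || pvHex c))
    = ((decide (cs.length = 14)) &&
       (PySem.List.enumerate cs 0).all
         (fun ic => if ic.1 == 4 || ic.1 == 9 then ic.2 == '.' else pvHex ic.2)) := by
  by_cases hl : cs.length = 14
  case neg => simp [hl]
  case pos =>
  rcases cs with _|⟨c0,_|⟨c1,_|⟨c2,_|⟨c3,_|⟨c4,_|⟨c5,_|⟨c6,_|⟨c7,_|⟨c8,_|⟨c9,_|⟨c10,_|⟨c11,_|⟨c12,_|⟨c13,cs⟩⟩⟩⟩⟩⟩⟩⟩⟩⟩⟩⟩⟩⟩ <;> simp at hl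
  cases cs with
  | cons x t => simp at hl
  | nil =>
  by_cases hd4 : c4 = '.'
  case neg =>
    have h1 : (PySem.List.pyGet? [c0,c1,c2,c3,c4,c5,c6,c7,c8,c9,c10,c11,c12,c13] 4 == some '.') = false := by
      simp [hd4]
    have h2 : ((PySem.List.enumerate [c0,c1,c2,c3,c4,c5,c6,c7,c8,c9,c10,c11,c12,c13] 0).all
         (fun ic => if ic.1 == 4 || ic.1 == 9 then ic.2 == '.' else pvHex ic.2)) = false := by
      simp [PySem.List.enumerate_cons, PySem.List.enumerate_nil, hd4]
    simp only [h1, h2, Bool.false_and, Bool.and_false]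
  case pos =>
  by_cases hd9 : c9 = '.'
  case neg =>
    have h1 : (PySem.List.pyGet? [c0,c1,c2,c3,c4,c5,c6,c7,c8,c9,c10,c11,c12,c13] 9 == some '.') = false := by
      simp [hd9]
    have h2 : ((PySem.List.enumerate [c0,c1,c2,c3,c4,c5,c6,c7,c8,c9,c10,c11,c12,c13] 0).all
         (fun ic => if ic.1 == 4 || ic.1 == 9 then ic.2 == '.' else pvHex ic.2)) = false := by
      simp [PySem.List.enumerate_cons, PySem.List.enumerate_nil, hd9]
    simp only [h1, h2, Bool.false_and, Bool.and_false]
  case pos =>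
  subst hd4; subst hd9
  simp [PySem.List.enumerate_cons, PySem.List.enumerate_nil, List.count_cons]
  have hk := pv_key [c0,c1,c2,c3,c5,c6,c7,c8,c10,c11,c12,c13]
  simp only [List.count_cons, List.count_nil, List.all_cons, List.all_nil, Bool.and_true,
    Nat.zero_add, beq_iff_eq] at hk
  rw [← hk]
  congr 1
  simp only [decide_eq_decide]
  omega

-- ===== VERDICT (by name: the statement is the Claim_ definition above) =====
theorem isCiscoMAC_spec : Claim_equal_isCiscoMAC := by
  intro mac _
  unfold Spec_isCiscoMAC
  rw [isCiscoMAC_char, isCiscoMAC_alt_char, pv_main]
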